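-- pv_equiv track=rewrite | github.com/e34106052/askllm | askcos_tree_utils.py | _route_nodes
-- ===== SOURCE A (Python) =====
-- from typing import Any, Dict, List, Tuple
--
-- def _route_nodes(edges: List[Dict[str, Any]], uuid2smiles: Dict[str, str]) -> Tuple[List[str], List[str]]:
--     reactions, chemicals = [], []
--     seen_r, seen_c = set(), set()
--     for e in edges:
--         if not isinstance(e, dict):
--             continue
--         for uid in (e.get("source"), e.get("target")):
--             if not uid:
--                 continue
--             smi = uuid2smiles.get(uid, uid)
--             if ">>" in str(smi):
--                 if smi not in seen_r:
--                     seen_r.add(smi)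
--                     reactions.append(smi)
--             else:
--                 if smi not in seen_c:
--                     seen_c.add(smi)
--                     chemicals.append(smi)
--     return reactions, chemicals
-- ===== SOURCE B (Python) =====
-- from typing import Any, Dict, List, Tuple
--
-- def _route_nodes(edges: List[Dict[str, Any]], uuid2smiles: Dict[str, str]) -> Tuple[List[str], List[str]]:
--     flat = []
--     for e in edges:
--         if not isinstance(e, dict):
--             continue
--         for uid in (e.get("source"), e.get("target")):
--             if uid:
--                 flat.append(uuid2smiles.get(uid, uid))
--     uniq = list(dict.fromkeys(flat))
--     reactions = [s for s in uniq if ">>" in str(s)]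
--     chemicals = [s for s in uniq if ">>" not in str(s)]
--     return reactions, chemicals
-- ===== Notes on version B (the rewrite author's own statement) =====
-- stated objective: simpler
-- what changed: Replaces the single pass maintaining two parallel seen-sets with a flatten-then-dedup-then-partition decomposition: collect all mapped SMILES in order, dedup once with dict.fromkeys, then split by the '>>' reaction marker (valid because the two classes are disjoint by the predicate).
import Mathlib
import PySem

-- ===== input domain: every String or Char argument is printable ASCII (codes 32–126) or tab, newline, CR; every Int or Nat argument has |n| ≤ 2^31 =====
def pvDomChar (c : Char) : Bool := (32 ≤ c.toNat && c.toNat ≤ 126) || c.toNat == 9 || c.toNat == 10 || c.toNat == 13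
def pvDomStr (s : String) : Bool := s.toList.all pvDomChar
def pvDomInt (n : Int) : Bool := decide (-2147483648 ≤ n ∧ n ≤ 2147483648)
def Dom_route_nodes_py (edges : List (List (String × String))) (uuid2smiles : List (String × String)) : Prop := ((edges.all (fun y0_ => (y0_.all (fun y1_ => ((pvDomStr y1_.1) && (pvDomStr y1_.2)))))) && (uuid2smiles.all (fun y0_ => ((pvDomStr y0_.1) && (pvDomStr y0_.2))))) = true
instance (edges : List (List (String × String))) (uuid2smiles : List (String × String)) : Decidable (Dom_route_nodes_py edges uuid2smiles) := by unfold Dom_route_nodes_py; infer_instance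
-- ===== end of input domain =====

-- B replaces A's single pass with two parallel seen-sets by flatten → one global dedup → partition by '>>' (same output; objective: simpler).
-- ===== PORT A =====
-- per-uid step of A's inner loop: skip falsy uid, map through uuid2smiles, classify by '>>' with two seen-sets
def pvStepUid (uuid2smiles : List (String × String))
    (st : List String × List String × PySem.Set String × PySem.Set String)
    (o : Option String) : List String × List String × PySem.Set String × PySem.Set String :=
  match o with
  | none => st
  | some uid =>
    if uid == "" then st
    else
      let smi := PySem.Dict.getD ⟨uuid2smiles⟩ uid uid
      if PySem.Str.isIn ">>" smi then
        if PySem.Set.contains st.2.2.1 smi then st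
        else (st.1 ++ [smi], st.2.1, PySem.Set.add st.2.2.1 smi, st.2.2.2)
      else
        if PySem.Set.contains st.2.2.2 smi then st
        else (st.1, st.2.1 ++ [smi], st.2.2.1, PySem.Set.add st.2.2.2 smi)

-- the 'isinstance(e, dict)' guard is vacuous under the type convention (every e IS a dict)
def route_nodes_py (edges : List (List (String × String))) (uuid2smiles : List (String × String)) : List String × List String :=
  let st := edges.foldl
    (fun st e => [PySem.Dict.get? ⟨e⟩ "source", PySem.Dict.get? ⟨e⟩ "target"].foldl (pvStepUid uuid2smiles) st)
    ([], [], PySem.Set.empty, PySem.Set.empty)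
  (st.1, st.2.1)

-- ===== PORT B =====
-- collect one mapped SMILES into the flat list (skip falsy uid)
def pvCollect (uuid2smiles : List (String × String)) (acc : List String) (o : Option String) : List String :=
  match o with
  | none => acc
  | some uid => if uid == "" then acc else acc ++ [PySem.Dict.getD ⟨uuid2smiles⟩ uid uid]

def route_nodes_py_alt (edges : List (List (String × String))) (uuid2smiles : List (String × String)) : List String × List String :=
  let flat := edges.foldl
    (fun acc e => [PySem.Dict.get? ⟨e⟩ "source", PySem.Dict.get? ⟨e⟩ "target"].foldl (pvCollect uuid2smiles) acc)
    []
  let uniq := PySem.List.dedup flat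
  (uniq.filter (fun s => PySem.Str.isIn ">>" s), uniq.filter (fun s => !PySem.Str.isIn ">>" s))

-- ===== PRECONDITION & SPEC =====
def Spec_route_nodes_py (edges : List (List (String × String))) (uuid2smiles : List (String × String)) (out : List String × List String) : Prop := out = route_nodes_py_alt edges uuid2smiles
instance (edges : List (List (String × String))) (uuid2smiles : List (String × String)) (out : List String × List String) : Decidable (Spec_route_nodes_py edges uuid2smiles out) := by unfold Spec_route_nodes_py; infer_instance

-- ===== CLAIM (what is proved, stated in full; the proofs are below) =====
def Claim_equal_route_nodes_py : Prop := ∀ (edges : List (List (String × String))) (uuid2smiles : List (String × String)), Dom_route_nodes_py edges uuid2smiles → Spec_route_nodes_py edges uuid2smiles (route_nodes_py edges uuid2smiles)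

-- ===== LEMMAS AND PROOFS =====

-- the loop invariant state of A, expressed from the processed flat prefix
def pvS (pr : List String) : List String × List String × PySem.Set String × PySem.Set String :=
  ((PySem.List.dedup pr).filter (fun s => PySem.Str.isIn ">>" s),
   (PySem.List.dedup pr).filter (fun s => !PySem.Str.isIn ">>" s),
   (PySem.List.dedup pr).filter (fun s => PySem.Str.isIn ">>" s),
   (PySem.List.dedup pr).filter (fun s => !PySem.Str.isIn ">>" s))

lemma dedup_append_singleton (pr : List String) (x : String) :
    PySem.List.dedup (pr ++ [x]) = PySem.Set.add (PySem.List.dedup pr) x := by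
  simp [PySem.List.dedup_eq_ofList, PySem.Set.ofList_eq_foldl, List.foldl_append]

lemma mem_filter_contains (l : List String) (p : String → Bool) (x : String) :
    PySem.Set.contains (l.filter p) x = (x ∈ l && p x) := by
  simp [PySem.Set.contains]

lemma step_S (u : List (String × String)) (pr : List String) (o : Option String) :
    pvStepUid u (pvS pr) o = pvS (pvCollect u pr o) := by
  cases o with
  | none => simp [pvStepUid, pvCollect]
  | some uid =>
    by_cases h0 : uid = ""
    · simp [pvStepUid, pvCollect, h0]
    · have h0' : (uid == "") = false := by simp [h0]
      simp only [pvStepUid, pvCollect, h0', Bool.false_eq_true, if_false]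
      set smi := PySem.Dict.getD ⟨u⟩ uid uid with hsmi
      by_cases hmem : smi ∈ pr
      · have hd : PySem.List.dedup (pr ++ [smi]) = PySem.List.dedup pr := by
          rw [dedup_append_singleton]
          simp [PySem.Set.add, PySem.Set.contains, hmem]
        have hmd : smi ∈ PySem.List.dedup pr := by simp [hmem]
        by_cases hp : PySem.Str.isIn ">>" smi = true
        · simp only [pvS, hd, hp, if_true, mem_filter_contains]
          simp [hmem]
        · simp only [pvS, hd, hp, mem_filter_contains]
          simp [hmem]
      · have hd : PySem.List.dedup (pr ++ [smi]) = PySem.List.dedup pr ++ [smi] := by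
          rw [dedup_append_singleton]
          simp [PySem.Set.add, PySem.Set.contains, hmem]
        have hmd : smi ∉ PySem.List.dedup pr := by simp [hmem]
        by_cases hp : PySem.Str.isIn ">>" smi = true
        · have hp' : PySem.Chars.isIn ['>', '>'] smi.toList = true := by
            simpa [PySem.Str.isIn] using hp
          simp only [pvS, hd, hp, mem_filter_contains]
          simp [hp', hmem, List.filter_append, PySem.Set.add, PySem.Set.contains,
                PySem.Str.isIn]
        · have hp' : PySem.Chars.isIn ['>', '>'] smi.toList = false := by
            simpa [PySem.Str.isIn] using hp
          simp only [pvS, hd, hp, mem_filter_contains]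
          simp [hp', hmem, List.filter_append, PySem.Set.add, PySem.Set.contains,
                PySem.Str.isIn]

lemma inner_S (u : List (String × String)) (os : List (Option String)) (pr : List String) :
    os.foldl (pvStepUid u) (pvS pr) = pvS (os.foldl (pvCollect u) pr) := by
  induction os generalizing pr with
  | nil => rfl
  | cons o os ih => rw [List.foldl_cons, step_S]; exact ih _

lemma outer_S (u : List (String × String)) (es : List (List (String × String))) (pr : List String) :
    es.foldl (fun st e => [PySem.Dict.get? ⟨e⟩ "source", PySem.Dict.get? ⟨e⟩ "target"].foldl (pvStepUid u) st) (pvS pr)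
      = pvS (es.foldl (fun acc e => [PySem.Dict.get? ⟨e⟩ "source", PySem.Dict.get? ⟨e⟩ "target"].foldl (pvCollect u) acc) pr) := by
  induction es generalizing pr with
  | nil => rfl
  | cons e es ih => rw [List.foldl_cons, inner_S, List.foldl_cons]; exact ih _

-- ===== VERDICT (by name: the statement is the Claim_ definition above) =====
theorem route_nodes_py_spec : Claim_equal_route_nodes_py := by
  intro edges u _
  show route_nodes_py edges u = route_nodes_py_alt edges u
  simp only [route_nodes_py, route_nodes_py_alt]
  rw [show (([], [], PySem.Set.empty, PySem.Set.empty) :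
        List String × List String × PySem.Set String × PySem.Set String) = pvS [] from rfl,
      outer_S]
  rfl
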